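-- pv_equiv track=rewrite | github.com/ceastld/alg | leetcode/hot200/backtracking/h491.ans.py | findSubsequences_iterative
-- ===== SOURCE A (Python) =====
-- from typing import List
--
-- def findSubsequences_iterative(nums: List[int]) -> List[List[int]]:
--     """
--     迭代解法：使用队列 + BFS
--
--     解题思路：
--     1. 使用队列存储部分子序列
--     2. 每次从队列中取出一个部分子序列
--     3. 添加下一个元素，形成新的子序列
--     4. 使用去重策略避免重复子序列
--
--     时间复杂度：O(2^n * n)
--     空间复杂度：O(2^n)
--     """
--     from collections import deque
--
--     result = []
--     queue = deque([([], 0)])  # (当前子序列, 当前位置)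
--     seen = set()
--
--     while queue:
--         current_subsequence, start = queue.popleft()
--
--         # 如果当前序列长度大于等于2，则加入结果
--         if len(current_subsequence) >= 2:
--             subsequence_tuple = tuple(current_subsequence)
--             if subsequence_tuple not in seen:
--                 seen.add(subsequence_tuple)
--                 result.append(current_subsequence)
--
--         # 添加下一个元素
--         used = set()
--         for i in range(start, len(nums)):
--             # 去重：跳过重复的元素
--             if nums[i] in used:
--                 continue
--
--             # 剪枝：如果当前元素小于序列最后一个元素，则跳过
--             if current_subsequence and nums[i] < current_subsequence[-1]:
--                 continue
--
--             used.add(nums[i])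
--             new_subsequence = current_subsequence + [nums[i]]
--             queue.append((new_subsequence, i + 1))
--
--     return result
-- ===== SOURCE B (Python) =====
-- def findSubsequences_iterative(nums):
--     """Recursive DFS backtracking; results are collected into per-length
--     buckets so that concatenating the buckets reproduces the BFS
--     (length-ascending, then lexicographic) output order."""
--     n = len(nums)
--     buckets = [[] for _ in range(n + 1)]
--     seen = set()
--
--     def dfs(sub, start):
--         if len(sub) >= 2:
--             t = tuple(sub)
--             if t not in seen:
--                 seen.add(t)
--                 buckets[len(sub)].append(sub)
--         used = set()
--         for i in range(start, n):
--             if nums[i] in used: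
--                 continue
--             if sub and nums[i] < sub[-1]:
--                 continue
--             used.add(nums[i])
--             dfs(sub + [nums[i]], i + 1)
--
--     dfs([], 0)
--     return [s for bucket in buckets for s in bucket]
-- ===== Notes on version B (the rewrite author's own statement) =====
-- stated objective: alternative
-- what changed: Replaces the deque-driven BFS over partial subsequences with a recursive DFS backtracking that appends each new subsequence to a per-length bucket and concatenates the buckets, reproducing the BFS length-then-lexicographic output order without a queue.
import Mathlib
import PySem

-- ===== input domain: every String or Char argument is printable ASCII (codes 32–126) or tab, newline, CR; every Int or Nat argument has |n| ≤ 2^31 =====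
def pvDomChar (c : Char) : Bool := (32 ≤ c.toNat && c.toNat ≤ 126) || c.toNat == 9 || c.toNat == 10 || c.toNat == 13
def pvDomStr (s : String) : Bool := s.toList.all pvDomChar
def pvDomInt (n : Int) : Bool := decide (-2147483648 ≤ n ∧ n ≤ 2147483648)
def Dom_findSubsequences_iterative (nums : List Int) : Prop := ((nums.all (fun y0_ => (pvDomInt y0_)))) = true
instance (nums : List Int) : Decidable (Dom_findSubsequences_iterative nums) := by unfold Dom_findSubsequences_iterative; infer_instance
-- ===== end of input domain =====

-- B replaces A's deque-driven BFS with recursive DFS backtracking into per-length buckets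
-- (alternative decomposition, same output; proved equal for all inputs).


-- ===== PORT A =====
-- BFS with a FIFO queue of (partial subsequence, next start index); the fuel
-- argument only makes the loop total (2^len(nums) provably bounds the queue measure,
-- so the zero-fuel branch is never reached); indices produced by pyRange are in
-- range, so pyGetD is exact here.
def pvLoopA (nums : List Int) : Nat → List (List Int × Int) → PySem.Set (List Int) → List (List Int) → List (List Int)
  | _, [], _, result => result
  | 0, _ :: _, _, result => result
  | fuel+1, (cur, start) :: rest, seen, result =>
    let sr :=
      if 2 ≤ cur.length then
        if PySem.Set.contains seen cur then (seen, result)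
        else (PySem.Set.add seen cur, result ++ [cur])
      else (seen, result)
    let st := (PySem.List.pyRange start nums.length).foldl
      (fun (st : PySem.Set Int × List (List Int × Int)) i =>
        let v := PySem.List.pyGetD nums i 0
        if PySem.Set.contains st.1 v then st
        else if cur ≠ [] ∧ v < PySem.List.pyGetD cur (-1) 0 then st
        else (PySem.Set.add st.1 v, st.2 ++ [(cur ++ [v], i + 1)]))
      (PySem.Set.empty, rest)
    pvLoopA nums fuel st.2 sr.1 sr.2

def findSubsequences_iterative (nums : List Int) : List (List Int) :=
  pvLoopA nums (2 ^ nums.length) [([], 0)] PySem.Set.empty []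

-- ===== PORT B =====
-- DFS backtracking collecting results into per-length buckets; the fuel argument
-- only makes the recursion total (len(nums)+1 bounds the remaining depth, so the
-- zero-fuel branch is never reached); indices produced by pyRange are in range,
-- so pyGetD is exact here.
def pvDfsB (nums : List Int) : Nat → List Int → Int → PySem.Set (List Int) × List (List (List Int)) → PySem.Set (List Int) × List (List (List Int))
  | 0, _, _, st => st
  | fuel+1, sub, start, st0 =>
    let sb :=
      if 2 ≤ sub.length then
        if PySem.Set.contains st0.1 sub then st0
        else (PySem.Set.add st0.1 sub, st0.2.modify sub.length (fun b => b ++ [sub]))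
      else st0
    let st := (PySem.List.pyRange start nums.length).foldl
      (fun (p : PySem.Set Int × (PySem.Set (List Int) × List (List (List Int)))) i =>
        let v := PySem.List.pyGetD nums i 0
        if PySem.Set.contains p.1 v then p
        else if sub ≠ [] ∧ v < PySem.List.pyGetD sub (-1) 0 then p
        else (PySem.Set.add p.1 v, pvDfsB nums fuel (sub ++ [v]) (i + 1) p.2))
      (PySem.Set.empty, sb)
    st.2

def findSubsequences_iterative_alt (nums : List Int) : List (List Int) :=
  let buckets := List.replicate (nums.length + 1) ([] : List (List Int))
  (pvDfsB nums (nums.length + 1) [] 0 (PySem.Set.empty, buckets)).2.flatten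

-- ===== PRECONDITION & SPEC =====
def Spec_findSubsequences_iterative (nums : List Int) (out : List (List Int)) : Prop := out = findSubsequences_iterative_alt nums
instance (nums : List Int) (out : List (List Int)) : Decidable (Spec_findSubsequences_iterative nums out) := by unfold Spec_findSubsequences_iterative; infer_instance

-- ===== CLAIM (what is proved, stated in full; the proofs are below) =====
def Claim_equal_findSubsequences_iterative : Prop := ∀ (nums : List Int), Dom_findSubsequences_iterative nums → Spec_findSubsequences_iterative nums (findSubsequences_iterative nums)

-- ===== LEMMAS AND PROOFS =====

-- The accepted children of a node (the shared inner loop of both Pythons),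
-- recursing over the index list with the `used` value-set.
def chAux (nums sub : List Int) : List Int → PySem.Set Int → List (List Int × Int)
  | [], _ => []
  | i :: is, used =>
    let v := PySem.List.pyGetD nums i 0
    if PySem.Set.contains used v then chAux nums sub is used
    else if sub ≠ [] ∧ v < PySem.List.pyGetD sub (-1) 0 then chAux nums sub is used
    else (sub ++ [v], i + 1) :: chAux nums sub is (PySem.Set.add used v)

def pvCh (nums : List Int) (p : List Int × Int) : List (List Int × Int) :=
  chAux nums p.1 (PySem.List.pyRange p.2 nums.length) PySem.Set.empty

-- A's per-node emission step on (seen, result).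
def emitA (sr : PySem.Set (List Int) × List (List Int)) (p : List Int × Int) : PySem.Set (List Int) × List (List Int) :=
  if 2 ≤ p.1.length then
    if PySem.Set.contains sr.1 p.1 then sr
    else (PySem.Set.add sr.1 p.1, sr.2 ++ [p.1])
  else sr

-- B's per-node emission step on (seen, buckets).
def emitB (sb : PySem.Set (List Int) × List (List (List Int))) (p : List Int × Int) : PySem.Set (List Int) × List (List (List Int)) :=
  if 2 ≤ p.1.length then
    if PySem.Set.contains sb.1 p.1 then sb
    else (PySem.Set.add sb.1 p.1, sb.2.modify p.1.length (fun b => b ++ [p.1]))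
  else sb

-- Level-by-level machine (A's BFS, grouped into levels).
def runLevels (nums : List Int) : Nat → List (List Int × Int) → PySem.Set (List Int) → List (List Int) → List (List Int)
  | 0, _, _, r => r
  | m+1, q, s, r =>
    let sr := q.foldl emitA (s, r)
    runLevels nums m (q.flatMap (pvCh nums)) sr.1 sr.2

-- The k-th level of the exploration tree below a node list.
def iterFlat (nums : List Int) : Nat → List (List Int × Int) → List (List Int × Int)
  | 0, l => l
  | m+1, l => iterFlat nums m (l.flatMap (pvCh nums))

-- DFS preorder visit list (B's traversal order).
def visits (nums : List Int) : Nat → List Int → Int → List (List Int × Int)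
  | 0, _, _ => []
  | f+1, sub, start => (sub, start) :: (pvCh nums (sub, start)).flatMap (fun c => visits nums f c.1 c.2)

-- First-occurrence dedup (length ≥ 2 only) relative to an already-seen list.
def dedupNew (s : List (List Int)) : List (List Int) → List (List Int)
  | [] => []
  | x :: xs => if 2 ≤ x.length ∧ x ∉ s then x :: dedupNew (s ++ [x]) xs else dedupNew s xs

def outLvl (nums : List Int) (k : Nat) : List (List Int) :=
  dedupNew [] ((iterFlat nums k [([], 0)]).map (·.1))

def pvWeight (nums : List Int) (p : List Int × Int) : Nat := 2 ^ (nums.length - p.2.toNat)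
def pvMeasure (nums : List Int) (l : List (List Int × Int)) : Nat := (l.map (pvWeight nums)).sum

-- ---- basic facts about chAux / pvCh ----
lemma chAux_mem (nums sub : List Int) (l : List Int) (used : PySem.Set Int)
    (c : List Int × Int) (hc : c ∈ chAux nums sub l used) :
    ∃ i ∈ l, c = (sub ++ [PySem.List.pyGetD nums i 0], i + 1) := by
  revert used c hc
  induction l with
  | nil => intro used c hc; simp [chAux] at hc
  | cons i is ih =>
    intro used c hc
    simp only [chAux] at hc
    split_ifs at hc with h1 h2
    · obtain ⟨j, hj, e⟩ := ih used c hc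
      exact ⟨j, List.mem_cons_of_mem _ hj, e⟩
    · obtain ⟨j, hj, e⟩ := ih used c hc
      exact ⟨j, List.mem_cons_of_mem _ hj, e⟩
    · rcases List.mem_cons.mp hc with hc | hc
      · exact ⟨i, List.mem_cons_self, hc⟩
      · obtain ⟨j, hj, e⟩ := ih _ c hc
        exact ⟨j, List.mem_cons_of_mem _ hj, e⟩


lemma pvCh_mem (nums : List Int) (p c : List Int × Int) (hc : c ∈ pvCh nums p) :
    ∃ i : Int, p.2 ≤ i ∧ i < nums.length ∧ c = (p.1 ++ [PySem.List.pyGetD nums i 0], i + 1) := by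
  obtain ⟨i, hi, e⟩ := chAux_mem nums p.1 _ _ c hc
  rw [PySem.List.mem_pyRange_one] at hi
  exact ⟨i, hi.1, hi.2, e⟩


lemma chAux_measure (nums sub : List Int) (l : List Int) (used : PySem.Set Int) :
    pvMeasure nums (chAux nums sub l used) ≤ (l.map (fun i => 2 ^ (nums.length - (i+1).toNat))).sum := by
  revert used
  induction l with
  | nil => intro used; simp [chAux, pvMeasure]
  | cons i is ih =>
    intro used
    simp only [chAux]
    split_ifs with h1 h2
    · calc pvMeasure nums (chAux nums sub is used) ≤ _ := ih used
        _ ≤ _ := by simp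
    · calc pvMeasure nums (chAux nums sub is used) ≤ _ := ih used
        _ ≤ _ := by simp
    · simp only [pvMeasure, List.map_cons, List.sum_cons, pvWeight]
      have := ih (PySem.Set.add used (PySem.List.pyGetD nums i 0))
      simp only [pvMeasure] at this
      omega


lemma sum_weights_range (nums : List Int) (d : Nat) (a : Int) (ha : 0 ≤ a)
    (hd : nums.length - a.toNat ≤ d) :
    ((PySem.List.pyRange a nums.length).map (fun i => 2 ^ (nums.length - (i+1).toNat))).sum
      ≤ 2 ^ (nums.length - a.toNat) - 1 := by
  revert a
  induction d with
  | zero =>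
    intro a ha hd
    have hge : (nums.length : Int) ≤ a := by omega
    have : PySem.List.pyRange a nums.length = [] := by
      rw [List.eq_nil_iff_forall_not_mem]
      intro x hx
      rw [PySem.List.mem_pyRange_one] at hx
      omega
    simp [this]
  | succ d ih =>
    intro a ha hd
    by_cases hlt : a < (nums.length : Int)
    · rw [PySem.List.pyRange_one_cons hlt]
      have h1 : ((PySem.List.pyRange (a+1) nums.length).map (fun i => 2 ^ (nums.length - (i+1).toNat))).sum
          ≤ 2 ^ (nums.length - (a+1).toNat) - 1 := ih (a+1) (by omega) (by omega)
      simp only [List.map_cons, List.sum_cons]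
      have hat : (a+1).toNat = a.toNat + 1 := by omega
      have hlt' : a.toNat < nums.length := by omega
      have hpow : 2 ^ (nums.length - (a+1).toNat) + 2 ^ (nums.length - (a+1).toNat) = 2 ^ (nums.length - a.toNat) := by
        rw [hat]
        have : nums.length - a.toNat = (nums.length - (a.toNat + 1)) + 1 := by omega
        rw [this, pow_succ]
        ring
      have hpos : 0 < 2 ^ (nums.length - (a+1).toNat) := by positivity
      omega
    · have : PySem.List.pyRange a nums.length = [] := by
        rw [List.eq_nil_iff_forall_not_mem]
        intro x hx
        rw [PySem.List.mem_pyRange_one] at hx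
        omega
      simp [this]


lemma pvCh_measure (nums : List Int) (p : List Int × Int) (hp : 0 ≤ p.2) :
    pvMeasure nums (pvCh nums p) + 1 ≤ pvWeight nums p := by
  have h1 := chAux_measure nums p.1 (PySem.List.pyRange p.2 nums.length) PySem.Set.empty
  have h2 := sum_weights_range nums nums.length p.2 hp (by omega)
  have hpos : 0 < pvWeight nums p := Nat.two_pow_pos _
  unfold pvCh
  unfold pvWeight at *
  omega


-- ---- the two inner folds compute chAux ----
lemma foldA_inner (nums cur : List Int) (l : List Int) (used : PySem.Set Int) (acc : List (List Int × Int)) :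
    (l.foldl
      (fun (st : PySem.Set Int × List (List Int × Int)) i =>
        let v := PySem.List.pyGetD nums i 0
        if PySem.Set.contains st.1 v then st
        else if cur ≠ [] ∧ v < PySem.List.pyGetD cur (-1) 0 then st
        else (PySem.Set.add st.1 v, st.2 ++ [(cur ++ [v], i + 1)]))
      (used, acc)).2 = acc ++ chAux nums cur l used := by
  revert used acc
  induction l with
  | nil => intro used acc; simp [chAux]
  | cons i is ih =>
    intro used acc
    simp only [List.foldl_cons, chAux]
    split_ifs with h1 h2
    · exact ih used acc
    · exact ih used acc
    · rw [ih]
      simp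


lemma foldB_inner {σ : Type} (nums sub : List Int) (g : List Int → Int → σ → σ)
    (l : List Int) (used : PySem.Set Int) (st : σ) :
    (l.foldl
      (fun (p : PySem.Set Int × σ) i =>
        let v := PySem.List.pyGetD nums i 0
        if PySem.Set.contains p.1 v then p
        else if sub ≠ [] ∧ v < PySem.List.pyGetD sub (-1) 0 then p
        else (PySem.Set.add p.1 v, g (sub ++ [v]) (i + 1) p.2))
      (used, st)).2 = (chAux nums sub l used).foldl (fun st c => g c.1 c.2 st) st := by
  revert used st
  induction l with
  | nil => intro used st; simp [chAux]
  | cons i is ih =>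
    intro used st
    simp only [List.foldl_cons, chAux]
    split_ifs with h1 h2
    · exact ih used st
    · exact ih used st
    · rw [ih]
      simp


-- ---- level machinery ----
lemma runLevels_nil (nums : List Int) (m : Nat) (s : PySem.Set (List Int)) (r : List (List Int)) :
    runLevels nums m [] s r = r := by
  induction m with
  | zero => rfl
  | succ m ih => simp [runLevels, ih]


lemma iterFlat_append (nums : List Int) (m : Nat) (l₁ l₂ : List (List Int × Int)) :
    iterFlat nums m (l₁ ++ l₂) = iterFlat nums m l₁ ++ iterFlat nums m l₂ := by
  revert l₁ l₂
  induction m with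
  | zero => intro l₁ l₂; rfl
  | succ m ih =>
    intro l₁ l₂
    simp only [iterFlat, List.flatMap_append]
    exact ih _ _


lemma iterFlat_succ_out (nums : List Int) (m : Nat) (l : List (List Int × Int)) :
    iterFlat nums (m+1) l = (iterFlat nums m l).flatMap (pvCh nums) := by
  revert l
  induction m with
  | zero => intro l; rfl
  | succ m ih =>
    intro l
    simp only [iterFlat]
    exact ih _


lemma iterFlat_eq_flatMap (nums : List Int) (m : Nat) (l : List (List Int × Int)) :
    iterFlat nums m l = l.flatMap (fun c => iterFlat nums m [c]) := by
  induction l with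
  | nil => induction m with
    | zero => rfl
    | succ m ih => simp only [iterFlat, List.flatMap_nil]; exact ih
  | cons c l ih =>
    have : c :: l = [c] ++ l := rfl
    rw [this, iterFlat_append, ih]
    simp


lemma levels_inv (nums : List Int) (k : Nat) (p : List Int × Int)
    (hp : p ∈ iterFlat nums k [([], 0)]) :
    p.1.length = k ∧ (k : Int) ≤ p.2 ∧ p.2 ≤ nums.length := by
  revert p
  induction k with
  | zero =>
    intro p hp
    simp only [iterFlat, List.mem_singleton] at hp
    subst hp
    exact ⟨rfl, le_refl _, by simp⟩
  | succ k ih =>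
    intro p hp
    rw [iterFlat_succ_out] at hp
    rw [List.mem_flatMap] at hp
    obtain ⟨x, hx, hpx⟩ := hp
    obtain ⟨hlen, hlo, hhi⟩ := ih x hx
    obtain ⟨i, hi1, hi2, he⟩ := pvCh_mem nums x p hpx
    subst he
    refine ⟨by simp [hlen], by push_cast; omega, by push_cast; omega⟩



lemma pvMeasure_append (nums : List Int) (l₁ l₂ : List (List Int × Int)) :
    pvMeasure nums (l₁ ++ l₂) = pvMeasure nums l₁ + pvMeasure nums l₂ := by
  simp [pvMeasure]

lemma pvMeasure_cons (nums : List Int) (x : List Int × Int) (l : List (List Int × Int)) :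
    pvMeasure nums (x :: l) = pvWeight nums x + pvMeasure nums l := by
  simp [pvMeasure, pvWeight]

lemma pvLoopA_step (nums cur : List Int) (start : Int) (rest : List (List Int × Int))
    (s : PySem.Set (List Int)) (r : List (List Int)) (f : Nat) :
    pvLoopA nums (f+1) ((cur, start) :: rest) s r
      = pvLoopA nums f (rest ++ pvCh nums (cur, start))
          (emitA (s, r) (cur, start)).1 (emitA (s, r) (cur, start)).2 := by
  simp only [pvLoopA]
  rw [foldA_inner]
  rfl

-- ---- A: fuel loop = level machine ----
lemma pvLoopA_runLevels (nums : List Int) : ∀ (N f m : Nat) (q acc : List (List Int × Int))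
    (s : PySem.Set (List Int)) (r : List (List Int)),
    f + m ≤ N →
    (∀ p ∈ q ++ acc, 0 ≤ p.2) →
    pvMeasure nums q + pvMeasure nums acc ≤ f →
    iterFlat nums m (acc ++ q.flatMap (pvCh nums)) = [] →
    pvLoopA nums f (q ++ acc) s r =
      runLevels nums m (acc ++ q.flatMap (pvCh nums)) (q.foldl emitA (s, r)).1 (q.foldl emitA (s, r)).2 := by
  intro N
  induction N with
  | zero =>
    intro f m q acc s r hN hpos hmeas hempty
    cases q with
    | cons x q' =>
      exfalso
      have h1 : 0 < pvWeight nums x := Nat.two_pow_pos _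
      rw [pvMeasure_cons] at hmeas
      omega
    | nil =>
      cases acc with
      | cons y acc' =>
        exfalso
        have h1 : 0 < pvWeight nums y := Nat.two_pow_pos _
        rw [pvMeasure_cons] at hmeas
        omega
      | nil =>
        have hf : f = 0 := by omega
        have hm : m = 0 := by omega
        subst hf; subst hm
        simp [pvLoopA, runLevels]
  | succ N ihN =>
    intro f m q acc s r hN hpos hmeas hempty
    cases q with
    | cons x q' =>
      obtain ⟨cur, start⟩ := x
      have hmc := hmeas
      rw [pvMeasure_cons] at hmc
      have h1 : 0 < pvWeight nums (cur, start) := Nat.two_pow_pos _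
      have hfpos : 0 < f := by omega
      obtain ⟨f₀, rfl⟩ : ∃ f₀, f = f₀ + 1 := ⟨f - 1, by omega⟩
      rw [List.cons_append, pvLoopA_step]
      have hstart : (0:Int) ≤ start := hpos (cur, start) (by simp)
      have hchpos : ∀ p ∈ pvCh nums (cur, start), 0 ≤ p.2 := by
        intro p hp
        obtain ⟨i, hi1, hi2, he⟩ := pvCh_mem nums _ p hp
        subst he
        simp only
        omega
      have hchm := pvCh_measure nums (cur, start) hstart
      have key := ihN f₀ m q' (acc ++ pvCh nums (cur, start))
        (emitA (s, r) (cur, start)).1 (emitA (s, r) (cur, start)).2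
        (by omega)
        (by
          intro p hp
          rcases List.mem_append.mp hp with h1 | h1
          · exact hpos p (List.mem_cons_of_mem _ (List.mem_append.mpr (Or.inl h1)))
          rcases List.mem_append.mp h1 with h2 | h2
          · exact hpos p (List.mem_cons_of_mem _ (List.mem_append.mpr (Or.inr h2)))
          · exact hchpos p h2)
        (by
          rw [pvMeasure_append]
          omega)
        (by
          rw [← hempty]
          congr 1
          simp [List.flatMap_cons])
      rw [← List.append_assoc] at key
      rw [key]
      congr 1
      simp [List.flatMap_cons]
    | nil =>
      cases acc with
      | nil =>
        cases f <;> cases m <;> simp [pvLoopA, runLevels, runLevels_nil]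
      | cons y acc' =>
        obtain ⟨cur, start⟩ := y
        cases m with
        | zero =>
          exfalso
          simp [iterFlat] at hempty
        | succ m' =>
          have hmc := hmeas
          rw [pvMeasure_cons] at hmc
          have h0 : pvMeasure nums ([] : List (List Int × Int)) = 0 := rfl
          have h1 : 0 < pvWeight nums (cur, start) := Nat.two_pow_pos _
          have hfpos : 0 < f := by omega
          obtain ⟨f₀, rfl⟩ : ∃ f₀, f = f₀ + 1 := ⟨f - 1, by omega⟩
          rw [List.nil_append, pvLoopA_step]
          have hstart : (0:Int) ≤ start := hpos (cur, start) (by simp)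
          have hchpos : ∀ p ∈ pvCh nums (cur, start), 0 ≤ p.2 := by
            intro p hp
            obtain ⟨i, hi1, hi2, he⟩ := pvCh_mem nums _ p hp
            subst he
            simp only
            omega
          have hchm := pvCh_measure nums (cur, start) hstart
          have key := ihN f₀ m' acc' (pvCh nums (cur, start))
            (emitA (s, r) (cur, start)).1 (emitA (s, r) (cur, start)).2
            (by omega)
            (by
              intro p hp
              rcases List.mem_append.mp hp with h1 | h1
              · exact hpos p (List.mem_cons_of_mem _ h1)
              · exact hchpos p h1)
            (by omega)
            (by
              simp only [iterFlat] at hempty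
              rw [← hempty]
              congr 1
              simp [List.flatMap_cons])
          rw [key]
          simp only [runLevels, List.flatMap_nil, List.append_nil, List.foldl_nil,
            List.flatMap_cons, List.foldl_cons, Prod.mk.eta]

-- ---- dedup bookkeeping ----
lemma dedupNew_congr (l : List (List Int)) : ∀ (s₁ s₂ : List (List Int)),
    (∀ y ∈ l, (y ∈ s₁ ↔ y ∈ s₂)) → dedupNew s₁ l = dedupNew s₂ l := by
  induction l with
  | nil => intro s₁ s₂ h; rfl
  | cons x xs ih =>
    intro s₁ s₂ h
    have hx := h x List.mem_cons_self
    simp only [dedupNew]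
    by_cases hc : 2 ≤ x.length ∧ x ∉ s₁
    · rw [if_pos hc, if_pos ⟨hc.1, fun hm => hc.2 (hx.mpr hm)⟩]
      congr 1
      refine ih _ _ (fun y hy => ?_)
      simp only [List.mem_append, List.mem_singleton]
      constructor
      · rintro (h1 | h1)
        · exact Or.inl ((h y (List.mem_cons_of_mem _ hy)).mp h1)
        · exact Or.inr h1
      · rintro (h1 | h1)
        · exact Or.inl ((h y (List.mem_cons_of_mem _ hy)).mpr h1)
        · exact Or.inr h1
    · rw [if_neg hc, if_neg (fun hc2 => hc ⟨hc2.1, fun hm => hc2.2 (hx.mp hm)⟩)]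
      exact ih _ _ (fun y hy => h y (List.mem_cons_of_mem _ hy))


lemma dedupNew_subset (l : List (List Int)) : ∀ (s : List (List Int)) (x : List Int),
    x ∈ dedupNew s l → x ∈ l := by
  induction l with
  | nil => intro s x hx; simp [dedupNew] at hx
  | cons y ys ih =>
    intro s x hx
    simp only [dedupNew] at hx
    split_ifs at hx with h
    · rcases List.mem_cons.mp hx with h1 | h1
      · exact h1 ▸ List.mem_cons_self
      · exact List.mem_cons_of_mem _ (ih _ _ h1)
    · exact List.mem_cons_of_mem _ (ih _ _ hx)


lemma emitA_fold (q : List (List Int × Int)) :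
    ∀ (s : PySem.Set (List Int)) (r : List (List Int)),
    q.foldl emitA (s, r) = (s ++ dedupNew s (q.map (·.1)), r ++ dedupNew s (q.map (·.1))) := by
  induction q with
  | nil => intro s r; simp [dedupNew]
  | cons p q ih =>
    intro s r
    simp only [List.foldl_cons, List.map_cons, dedupNew]
    by_cases h2 : 2 ≤ p.1.length
    · by_cases hm : p.1 ∈ s
      · have hcon : PySem.Set.contains s p.1 = true := by
          simp [PySem.Set.contains, hm]
        rw [if_neg (fun hc => hc.2 hm)]
        have : emitA (s, r) p = (s, r) := by
          simp [emitA, h2, hm]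
        rw [this, ih]
      · have hcon : PySem.Set.contains s p.1 = false := by
          simp [PySem.Set.contains, hm]
        rw [if_pos ⟨h2, hm⟩]
        have : emitA (s, r) p = (s ++ [p.1], r ++ [p.1]) := by
          simp [emitA, h2, PySem.Set.add, PySem.Set.contains, hm]
        rw [this, ih]
        simp
    · rw [if_neg (by simp [h2])]
      have : emitA (s, r) p = (s, r) := by simp [emitA, h2]
      rw [this, ih]


lemma runLevels_out (nums : List Int) : ∀ (m k : Nat) (q : List (List Int × Int))
    (s : PySem.Set (List Int)) (r : List (List Int)),
    (∀ p ∈ q, p.1.length = k) →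
    (∀ x ∈ s, x.length < k) →
    runLevels nums m q s r =
      r ++ ((List.range m).map (fun j => dedupNew [] ((iterFlat nums j q).map (·.1)))).flatten := by
  intro m
  induction m with
  | zero => intro k q s r hq hs; simp [runLevels]
  | succ m ih =>
    intro k q s r hq hs
    have hd : dedupNew s (q.map (·.1)) = dedupNew [] (q.map (·.1)) := by
      refine dedupNew_congr _ _ _ (fun y hy => ?_)
      simp only [List.mem_map] at hy
      obtain ⟨p, hp, he⟩ := hy
      have hyk : y.length = k := he ▸ hq p hp
      have hns : y ∉ s := fun h1 => by have := hs y h1; omega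
      simp [hns]
    have hfold := emitA_fold q s r
    simp only [runLevels, hfold]
    rw [ih (k+1) (q.flatMap (pvCh nums)) (s ++ dedupNew s (q.map (·.1))) (r ++ dedupNew s (q.map (·.1)))
      (by
        intro p hp
        rw [List.mem_flatMap] at hp
        obtain ⟨x, hx, hpx⟩ := hp
        obtain ⟨i, _, _, he⟩ := pvCh_mem nums x p hpx
        subst he
        simp [hq x hx])
      (by
        intro x hx
        rcases List.mem_append.mp hx with h1 | h1
        · exact Nat.lt_succ_of_lt (hs x h1)
        · have hx2 := dedupNew_subset _ _ _ h1
          simp only [List.mem_map] at hx2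
          obtain ⟨p, hp, he⟩ := hx2
          subst he
          have h4 := hq p hp
          omega)]
    rw [List.range_succ_eq_map]
    simp only [List.map_cons, List.map_map, List.flatten_cons, Function.comp_def]
    have h0 : iterFlat nums 0 q = q := rfl
    have hsucc : ∀ j, iterFlat nums (j+1) q = iterFlat nums j (q.flatMap (pvCh nums)) := fun j => rfl
    simp only [Nat.succ_eq_add_one, hsucc, h0]
    rw [← hd]
    simp [List.append_assoc]


-- ---- B: dfs = fold of emitB over the DFS visit list ----
lemma pvDfsB_visits (nums : List Int) : ∀ (f : Nat) (sub : List Int) (start : Int)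
    (st : PySem.Set (List Int) × List (List (List Int))),
    pvDfsB nums f sub start st = (visits nums f sub start).foldl emitB st := by
  intro f
  induction f with
  | zero => intro sub start st; simp [pvDfsB, visits]
  | succ f ih =>
    intro sub start st
    simp only [pvDfsB, visits, List.foldl_cons]
    rw [foldB_inner nums sub (fun a b c => pvDfsB nums f a b c)]
    have hfun : (fun (st : PySem.Set (List Int) × List (List (List Int))) (c : List Int × Int) => pvDfsB nums f c.1 c.2 st)
        = (fun acc c => (visits nums f c.1 c.2).foldl emitB acc) := by
      funext st c
      exact ih c.1 c.2 st
    rw [hfun, ← List.foldl_flatMap]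
    rfl


lemma visits_len (nums : List Int) : ∀ (f : Nat) (sub : List Int) (start : Int)
    (p : List Int × Int), p ∈ visits nums f sub start →
    p = (sub, start) ∨ sub.length < p.1.length := by
  intro f
  induction f with
  | zero => intro sub start p hp; simp [visits] at hp
  | succ f ih =>
    intro sub start p hp
    simp only [visits] at hp
    rcases List.mem_cons.mp hp with h | h
    · exact Or.inl h
    · rw [List.mem_flatMap] at h
      obtain ⟨c, hc, hpc⟩ := h
      obtain ⟨i, _, _, he⟩ := pvCh_mem nums (sub, start) c hc
      rcases ih c.1 c.2 p hpc with h1 | h1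
      · right
        have : p.1 = c.1 := by rw [h1]
        rw [this, he]
        simp
      · right
        have : c.1.length = sub.length + 1 := by rw [he]; simp
        omega


lemma visits_filter (nums : List Int) : ∀ (d f : Nat) (sub : List Int) (start : Int),
    0 ≤ start → start ≤ nums.length →
    nums.length + 1 - start.toNat ≤ f →
    (visits nums f sub start).filter (fun p => p.1.length == sub.length + d)
      = iterFlat nums d [(sub, start)] := by
  intro d
  induction d with
  | zero =>
    intro f sub start h0 hle hf
    have hf1 : 0 < f := by omega
    obtain ⟨f', rfl⟩ : ∃ f', f = f' + 1 := ⟨f - 1, by omega⟩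
    simp only [visits, List.filter_cons]
    have hhd : (sub.length == sub.length + 0) = true := by simp
    rw [hhd]
    have htail : (((pvCh nums (sub, start)).flatMap (fun c => visits nums f' c.1 c.2)).filter
        (fun p => p.1.length == sub.length + 0)) = [] := by
      rw [List.filter_eq_nil_iff]
      intro p hp
      rw [List.mem_flatMap] at hp
      obtain ⟨c, hc, hpc⟩ := hp
      obtain ⟨i, _, _, he⟩ := pvCh_mem nums _ c hc
      have hlen : c.1.length = sub.length + 1 := by subst he; simp
      rcases visits_len nums f' c.1 c.2 p hpc with h1 | h1
      · have : p.1.length = sub.length + 1 := by rw [h1]; exact hlen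
        simp only [beq_iff_eq]
        omega
      · simp only [beq_iff_eq]
        omega
    rw [htail]
    rfl
  | succ d ih =>
    intro f sub start h0 hle hf
    have hf1 : 0 < f := by omega
    obtain ⟨f', rfl⟩ : ∃ f', f = f' + 1 := ⟨f - 1, by omega⟩
    simp only [visits, List.filter_cons]
    have hhd : (sub.length == sub.length + (d + 1)) = false := by
      simp only [beq_eq_false_iff_ne]
      omega
    rw [hhd, List.filter_flatMap]
    have hmap : ∀ c ∈ pvCh nums (sub, start),
        (visits nums f' c.1 c.2).filter (fun p => p.1.length == sub.length + (d + 1))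
          = iterFlat nums d [c] := by
      intro c hc
      obtain ⟨i, hi1, hi2, he⟩ := pvCh_mem nums _ c hc
      have hlen : c.1.length = sub.length + 1 := by subst he; simp
      have hpred : (fun (p : List Int × Int) => p.1.length == sub.length + (d + 1))
          = (fun (p : List Int × Int) => p.1.length == c.1.length + d) := by
        funext p
        rw [hlen]
        have : sub.length + (d + 1) = sub.length + 1 + d := by omega
        rw [this]
      rw [hpred]
      refine ih f' c.1 c.2 ?_ ?_ ?_
      · subst he; simp only; omega
      · subst he; simp only; omega
      · subst he; simp only; omega
    rw [List.flatMap_congr hmap, ← iterFlat_eq_flatMap]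
    have hms : iterFlat nums (d + 1) [(sub, start)]
        = iterFlat nums d (pvCh nums (sub, start)) := by
      simp [iterFlat, List.flatMap_cons]
    rw [hms]
    simp


lemma emitB_fold_get (L : List (List Int × Int)) :
    ∀ (st : PySem.Set (List Int) × List (List (List Int))) (k : Nat),
    (L.foldl emitB st).2[k]?
      = (st.2[k]?).map (fun b => b ++ dedupNew st.1 ((L.map (·.1)).filter (fun s => s.length == k))) := by
  induction L with
  | nil =>
    intro st k
    cases hcell : st.2[k]? <;> simp [hcell, dedupNew]
  | cons p L ih =>
    intro st k
    rw [List.foldl_cons]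
    by_cases h2 : 2 ≤ p.1.length
    · by_cases hm : p.1 ∈ st.1
      · have hB : emitB st p = st := by
          simp [emitB, h2, PySem.Set.contains, hm]
        rw [hB, ih st k]
        have hlist : dedupNew st.1 (((p :: L).map (·.1)).filter (fun s => s.length == k))
            = dedupNew st.1 ((L.map (·.1)).filter (fun s => s.length == k)) := by
          simp only [List.map_cons, List.filter_cons]
          by_cases hpk : p.1.length = k
          · have hbeq : (p.1.length == k) = true := by simp [hpk]
            rw [hbeq, if_pos rfl]
            simp only [dedupNew]
            rw [if_neg (fun hc => hc.2 hm)]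
          · have hbeq : (p.1.length == k) = false := by simp [hpk]
            rw [hbeq, if_neg Bool.false_ne_true]
        rw [hlist]
      · have hB : emitB st p = (st.1 ++ [p.1], st.2.modify p.1.length (fun b => b ++ [p.1])) := by
          simp [emitB, h2, PySem.Set.contains, PySem.Set.add, hm]
        rw [hB, ih _ k]
        simp only [List.getElem?_modify]
        cases hcell : st.2[k]? with
        | none => simp
        | some b =>
          simp only [Option.map_eq_map, Option.map_some]
          simp only [List.map_cons, List.filter_cons]
          by_cases hpk : p.1.length = k
          · have hbeq : (p.1.length == k) = true := by simp [hpk]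
            rw [hbeq, if_pos rfl, if_pos hpk]
            simp only [dedupNew]
            rw [if_pos ⟨h2, hm⟩]
            simp
          · have hbeq : (p.1.length == k) = false := by simp [hpk]
            rw [hbeq, if_neg Bool.false_ne_true, if_neg hpk]
            have hcongr : dedupNew (st.1 ++ [p.1]) ((L.map (·.1)).filter (fun s => s.length == k))
                = dedupNew st.1 ((L.map (·.1)).filter (fun s => s.length == k)) := by
              refine dedupNew_congr _ _ _ (fun y hy => ?_)
              have hyk : y.length = k := by
                have h5 := List.mem_filter.mp hy
                simpa using h5.2
              have hyp : y ≠ p.1 := fun he => hpk (he ▸ hyk)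
              simp [List.mem_append, hyp]
            rw [hcongr]
    · have hB : emitB st p = st := by simp [emitB, h2]
      rw [hB, ih st k]
      have hlist : dedupNew st.1 (((p :: L).map (·.1)).filter (fun s => s.length == k))
          = dedupNew st.1 ((L.map (·.1)).filter (fun s => s.length == k)) := by
        simp only [List.map_cons, List.filter_cons]
        by_cases hpk : p.1.length = k
        · have hbeq : (p.1.length == k) = true := by simp [hpk]
          rw [hbeq, if_pos rfl]
          simp only [dedupNew]
          rw [if_neg (fun hc => h2 hc.1)]
        · have hbeq : (p.1.length == k) = false := by simp [hpk]
          rw [hbeq, if_neg Bool.false_ne_true]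
      rw [hlist]

-- ---- final assembly ----

lemma iterFlat_top (nums : List Int) : iterFlat nums (nums.length + 1) [([], (0:Int))] = [] := by
  rw [List.eq_nil_iff_forall_not_mem]
  intro p hp
  have h := levels_inv nums (nums.length + 1) p hp
  have h1 := h.2.1
  have h2 := h.2.2
  push_cast at h1
  omega


lemma portA_eq (nums : List Int) :
    findSubsequences_iterative nums
      = ((List.range (nums.length + 2)).map (outLvl nums)).flatten := by
  unfold findSubsequences_iterative
  have hempty : iterFlat nums (nums.length + 2)
      (([([], (0:Int))] : List (List Int × Int)) ++ ([] : List (List Int × Int)).flatMap (pvCh nums)) = [] := by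
    simp only [List.flatMap_nil, List.append_nil]
    rw [show nums.length + 2 = nums.length + 1 + 1 from rfl,
      iterFlat_succ_out, iterFlat_top]
    rfl
  have h := pvLoopA_runLevels nums (2 ^ nums.length + (nums.length + 2)) (2 ^ nums.length)
      (nums.length + 2) [] [([], 0)] PySem.Set.empty []
    (by omega)
    (by
      intro p hp
      simp only [List.nil_append, List.mem_singleton] at hp
      subst hp
      simp)
    (by simp [pvMeasure, pvWeight])
    hempty
  simp only [List.nil_append, List.flatMap_nil, List.append_nil, List.foldl_nil] at h
  rw [h]
  rw [runLevels_out nums (nums.length + 2) 0 [([], 0)] PySem.Set.empty []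
    (by
      intro p hp
      simp only [List.mem_singleton] at hp
      subst hp
      rfl)
    (by intro x hx; simp [PySem.Set.empty] at hx)]
  rfl


lemma portB_eq (nums : List Int) :
    findSubsequences_iterative_alt nums
      = ((List.range (nums.length + 1)).map (outLvl nums)).flatten := by
  have hdef : findSubsequences_iterative_alt nums
      = (pvDfsB nums (nums.length + 1) [] 0
          (PySem.Set.empty, List.replicate (nums.length + 1) ([] : List (List Int)))).2.flatten := rfl
  rw [hdef, pvDfsB_visits]
  suffices hb : ((visits nums (nums.length + 1) [] 0).foldl emitB
      (PySem.Set.empty, List.replicate (nums.length + 1) ([] : List (List Int)))).2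
        = (List.range (nums.length + 1)).map (outLvl nums) by
    rw [hb]
  apply List.ext_getElem?
  intro k
  rw [emitB_fold_get]
  have hv := visits_filter nums k (nums.length + 1) [] 0 (le_refl 0) (by simp) (by simp)
  simp only [List.length_nil, Nat.zero_add] at hv
  simp only [List.filter_map, Function.comp_def, hv]
  by_cases hk : k < nums.length + 1
  · simp [hk, outLvl, PySem.Set.empty]
  · simp [hk]

lemma outLvl_top (nums : List Int) : outLvl nums (nums.length + 1) = [] := by
  simp [outLvl, iterFlat_top, dedupNew]


-- ===== VERDICT (by name: the statement is the Claim_ definition above) =====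
theorem findSubsequences_iterative_spec : Claim_equal_findSubsequences_iterative := by
  intro nums _
  unfold Spec_findSubsequences_iterative
  rw [portA_eq, portB_eq, List.range_succ (n := nums.length + 1)]
  simp [outLvl_top]
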